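-- pv_equiv track=rewrite | github.com/cbuick317/bsq-account-checking | account_checking/scripts/_4_current_users_without_licences.py | check_all_values_missing
-- ===== SOURCE A (Python) =====
-- def check_all_values_missing(nested_list, values_to_check):
--
--     found_count = 0
--     for value in values_to_check:
--         for dictionary in nested_list:
--             if value in dictionary.values():
--                 found_count += 1
--                 break # break the inner loop when a value is found in a dictionary, preventing multiple counts.
--         else: #else statement of the for loop, executes if the inner for loop completes without break
--             continue # if the value is found, continue to the next value
--
--     if found_count == len(values_to_check):
--         return "all_found"
--     elif found_count > 0:
--         return "some_found"
--     else:
--         return "none_found"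
-- ===== SOURCE B (Python) =====
-- def check_all_values_missing(nested_list, values_to_check):
--     present = set()
--     for dictionary in nested_list:
--         present.update(dictionary.values())
--     targets = set(values_to_check)
--     if targets <= present:
--         return "all_found"
--     if not targets.isdisjoint(present):
--         return "some_found"
--     return "none_found"
-- ===== Notes on version B (the rewrite author's own statement) =====
-- stated objective: faster
-- what changed: Replaces A's per-value rescans of every dictionary (counter with break/else control flow) by one pass collecting all present values into a set, then classifying with two set relations (subset, disjointness); correct because the answer depends only on which distinct values are present.
import Mathlib
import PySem

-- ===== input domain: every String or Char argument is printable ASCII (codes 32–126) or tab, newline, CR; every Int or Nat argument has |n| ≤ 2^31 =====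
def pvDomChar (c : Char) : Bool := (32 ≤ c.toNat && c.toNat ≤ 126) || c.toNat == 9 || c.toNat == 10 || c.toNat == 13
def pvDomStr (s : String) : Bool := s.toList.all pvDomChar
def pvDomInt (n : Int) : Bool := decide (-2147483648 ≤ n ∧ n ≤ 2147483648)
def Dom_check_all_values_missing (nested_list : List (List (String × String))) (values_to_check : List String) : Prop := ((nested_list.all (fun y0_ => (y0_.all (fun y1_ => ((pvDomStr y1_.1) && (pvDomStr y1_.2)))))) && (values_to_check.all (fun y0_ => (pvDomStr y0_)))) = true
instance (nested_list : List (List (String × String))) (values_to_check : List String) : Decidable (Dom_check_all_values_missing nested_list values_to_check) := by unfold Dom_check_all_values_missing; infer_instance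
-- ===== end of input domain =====

-- B replaces A's per-value rescans (counter + break/else) by one collection pass into a set
-- of present values followed by two set relations (subset, disjointness): simpler control flow.

-- ===== PORT A =====
-- A's inner 'for dictionary in nested_list: if value in dictionary.values(): found += 1; break'
-- is a first-match scan over the dictionaries, i.e. List.any; dict.values() = PySem.Dict.values.
def check_all_values_missing (nested_list : List (List (String × String))) (values_to_check : List String) : String :=
  let found_count : Nat :=
    values_to_check.foldl
      (fun c value =>
        if nested_list.any (fun dictionary => ((PySem.Dict.ofList dictionary).values).contains value)
        then c + 1 else c) 0
  if found_count = values_to_check.length then "all_found"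
  else if found_count > 0 then "some_found"
  else "none_found"

-- ===== PORT B =====
def check_all_values_missing_alt (nested_list : List (List (String × String))) (values_to_check : List String) : String :=
  let present : PySem.Set String :=
    nested_list.foldl (fun s dictionary => PySem.Set.update s ((PySem.Dict.ofList dictionary).values)) PySem.Set.empty
  let targets : PySem.Set String := PySem.Set.ofList values_to_check
  if PySem.Set.issubset targets present then "all_found"
  else if !(PySem.Set.isdisjoint targets present) then "some_found"
  else "none_found"

-- ===== PRECONDITION & SPEC =====
def Spec_check_all_values_missing (nested_list : List (List (String × String))) (values_to_check : List String) (out : String) : Prop := out = check_all_values_missing_alt nested_list values_to_check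
instance (nested_list : List (List (String × String))) (values_to_check : List String) (out : String) : Decidable (Spec_check_all_values_missing nested_list values_to_check out) := by unfold Spec_check_all_values_missing; infer_instance

-- ===== CLAIM (what is proved, stated in full; the proofs are below) =====
def Claim_equal_check_all_values_missing : Prop := ∀ (nested_list : List (List (String × String))) (values_to_check : List String), Dom_check_all_values_missing nested_list values_to_check → Spec_check_all_values_missing nested_list values_to_check (check_all_values_missing nested_list values_to_check)

-- ===== LEMMAS AND PROOFS =====

-- membership in B's `present` accumulator
theorem pv_mem_foldl_update (l : List (List (String × String))) (s : PySem.Set String) (v : String) :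
    (v ∈ l.foldl (fun s d => PySem.Set.update s ((PySem.Dict.ofList d).values)) s) ↔
      v ∈ s ∨ ∃ d ∈ l, v ∈ (PySem.Dict.ofList d).values := by
  induction l generalizing s with
  | nil => simp
  | cons d rest ih =>
    simp [ih, PySem.Set.mem_update]
    tauto

-- A's counter is a countP
theorem pv_foldl_count (l : List String) (p : String → Bool) (c : Nat) :
    l.foldl (fun c v => if p v then c + 1 else c) c = c + l.countP p := by
  induction l generalizing c with
  | nil => simp
  | cons x rest ih =>
    by_cases h : p x <;> simp [h, ih]
    omega

theorem check_all_values_missing_eq (nested_list : List (List (String × String))) (values_to_check : List String) :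
    check_all_values_missing nested_list values_to_check = check_all_values_missing_alt nested_list values_to_check := by
  unfold check_all_values_missing check_all_values_missing_alt
  have hcnt := pv_foldl_count values_to_check
    (fun v => nested_list.any (fun d => ((PySem.Dict.ofList d).values).contains v)) 0
  simp only [hcnt, Nat.zero_add]
  set p : String → Bool := fun v => nested_list.any (fun d => ((PySem.Dict.ofList d).values).contains v) with hp
  have hmem : ∀ v : String,
      (v ∈ nested_list.foldl (fun s d => PySem.Set.update s ((PySem.Dict.ofList d).values)) PySem.Set.empty) ↔ p v := by
    intro v
    rw [pv_mem_foldl_update]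
    simp [hp, List.any_eq_true]
  by_cases hall : ∀ v ∈ values_to_check, p v = true
  · have h1 : values_to_check.countP p = values_to_check.length := List.countP_eq_length.mpr hall
    have h2 : PySem.Set.issubset (PySem.Set.ofList values_to_check)
        (nested_list.foldl (fun s d => PySem.Set.update s ((PySem.Dict.ofList d).values)) PySem.Set.empty) = true := by
      rw [PySem.Set.issubset_iff]
      intro x hx
      rw [hmem]
      exact hall x ((PySem.Set.mem_ofList _ _).mp hx)
    rw [if_pos h1, if_pos h2]
  · have h1 : values_to_check.countP p ≠ values_to_check.length := by
      intro h; exact hall (List.countP_eq_length.mp h)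
    have h2 : PySem.Set.issubset (PySem.Set.ofList values_to_check)
        (nested_list.foldl (fun s d => PySem.Set.update s ((PySem.Dict.ofList d).values)) PySem.Set.empty) = false := by
      rw [Bool.eq_false_iff]
      intro hs
      apply hall
      intro v hv
      exact (hmem v).mp ((PySem.Set.issubset_iff _ _).mp hs v ((PySem.Set.mem_ofList _ _).mpr hv))
    by_cases hsome : ∃ v ∈ values_to_check, p v = true
    · have h3 : 0 < values_to_check.countP p := List.countP_pos_iff.mpr hsome
      have h4 : PySem.Set.isdisjoint (PySem.Set.ofList values_to_check)
          (nested_list.foldl (fun s d => PySem.Set.update s ((PySem.Dict.ofList d).values)) PySem.Set.empty) = false := by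
        rw [Bool.eq_false_iff]
        intro hd
        obtain ⟨v, hv, hpv⟩ := hsome
        exact (PySem.Set.isdisjoint_iff _ _).mp hd v ((PySem.Set.mem_ofList _ _).mpr hv) ((hmem v).mpr hpv)
      rw [if_neg h1, if_pos h3, h2, h4]
      simp
    · have h3 : values_to_check.countP p = 0 := by
        rw [List.countP_eq_zero]
        intro v hv
        simp only [Bool.not_eq_true]
        rw [Bool.eq_false_iff]
        intro hpv
        exact hsome ⟨v, hv, hpv⟩
      have h4 : PySem.Set.isdisjoint (PySem.Set.ofList values_to_check)
          (nested_list.foldl (fun s d => PySem.Set.update s ((PySem.Dict.ofList d).values)) PySem.Set.empty) = true := by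
        rw [PySem.Set.isdisjoint_iff]
        intro v hv hmemv
        exact hsome ⟨v, (PySem.Set.mem_ofList _ _).mp hv, (hmem v).mp hmemv⟩
      rw [if_neg h1, if_neg (show ¬ values_to_check.countP p > 0 by omega), h2, h4]
      simp

-- ===== VERDICT (by name: the statement is the Claim_ definition above) =====
theorem check_all_values_missing_spec : Claim_equal_check_all_values_missing := by
  intro nested_list values_to_check _
  unfold Spec_check_all_values_missing
  exact check_all_values_missing_eq nested_list values_to_check
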